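-- pv_equiv track=rewrite | github.com/askhkhas995-debug/exam | piscine_forge/generators/bsq.py | solve_map
-- ===== SOURCE A (Python) =====
-- def solve_map(map_string: str) -> str:
--     """Solve a BSQ map and return the filled output string."""
--     lines = map_string.strip().split("\n")
--     header = lines[0]
--     # Parse header: last 3 chars are empty/obstacle/fill, rest is row count
--     fill_char = header[-1]
--     obs_char = header[-2]
--     empty_char = header[-3]
--
--     grid = [list(line) for line in lines[1:]]
--     rows = len(grid)
--     if rows == 0:
--         return map_string
--     cols = len(grid[0]) if grid else 0
--
--     # DP for largest square
--     dp = [[0] * cols for _ in range(rows)]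
--     max_size = 0
--     max_r, max_c = 0, 0
--     for r in range(rows):
--         for c in range(cols):
--             if grid[r][c] == empty_char:
--                 if r == 0 or c == 0:
--                     dp[r][c] = 1
--                 else:
--                     dp[r][c] = min(dp[r-1][c], dp[r][c-1], dp[r-1][c-1]) + 1
--                 if dp[r][c] > max_size:
--                     max_size = dp[r][c]
--                     max_r, max_c = r, c
--
--     # Fill the largest square
--     for r in range(max_r - max_size + 1, max_r + 1):
--         for c in range(max_c - max_size + 1, max_c + 1):
--             grid[r][c] = fill_char
--
--     result_lines = [header] + ["".join(row) for row in grid]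
--     return "\n".join(result_lines) + "\n"
-- ===== SOURCE B (Python) =====
-- def solve_map(map_string: str) -> str:
--     """Solve a BSQ map via row run-lengths + per-cell upward expansion."""
--     lines = map_string.strip().split("\n")
--     header = lines[0]
--     fill_char = header[-1]
--     empty_char = header[-3]
--
--     grid = [list(line) for line in lines[1:]]
--     rows = len(grid)
--     if rows == 0:
--         return map_string
--     cols = len(grid[0])
--
--     # L[r][c] = length of the run of empty cells ending at (r, c) in row r
--     runs = []
--     for r in range(rows):
--         run = 0
--         row_runs = []
--         for c in range(cols):
--             run = run + 1 if grid[r][c] == empty_char else 0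
--             row_runs.append(run)
--         runs.append(row_runs)
--
--     # Largest square with bottom-right (r, c): grow k while the k rows
--     # ending at r all have a run of at least k ending at column c.
--     best, best_r, best_c = 0, 0, 0
--     for r in range(rows):
--         for c in range(cols):
--             k, m, i = 0, cols + 1, 0
--             while i <= r:
--                 m = min(m, runs[r - i][c])
--                 if m >= i + 1:
--                     k = i + 1
--                     i += 1
--                 else:
--                     break
--             if k > best:
--                 best, best_r, best_c = k, r, c
--
--     # Rebuild the grid with the chosen square filled
--     out_rows = []
--     for r, row in enumerate(grid):
--         if best_r - best < r <= best_r: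
--             row = [fill_char if best_c - best < c <= best_c else ch
--                    for c, ch in enumerate(row)]
--         out_rows.append("".join(row))
--     return "\n".join([header] + out_rows) + "\n"
-- ===== Notes on version B (the rewrite author's own statement) =====
-- stated objective: alternative
-- what changed: Replaces the min-of-three-neighbours DP table by a row run-length table plus a per-cell upward expansion (largest k with k rows whose empty-run at this column is at least k), and rebuilds the filled grid functionally instead of mutating it in place.
import Mathlib
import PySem

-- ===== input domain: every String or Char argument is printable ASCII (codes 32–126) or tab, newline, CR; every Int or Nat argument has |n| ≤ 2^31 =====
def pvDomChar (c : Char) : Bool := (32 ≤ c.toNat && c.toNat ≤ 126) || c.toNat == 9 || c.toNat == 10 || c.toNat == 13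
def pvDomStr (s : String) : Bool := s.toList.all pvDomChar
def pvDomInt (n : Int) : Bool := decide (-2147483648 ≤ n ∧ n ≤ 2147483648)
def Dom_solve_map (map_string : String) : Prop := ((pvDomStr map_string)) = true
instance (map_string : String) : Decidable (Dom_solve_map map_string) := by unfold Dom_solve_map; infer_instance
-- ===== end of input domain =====

-- B replaces A's min-of-three-neighbours DP by row run-lengths + per-cell upward expansion and
-- rebuilds the filled grid functionally (alternative algorithm, similar cost; return value only —
-- neither port mutates, and A's in-place grid mutation is invisible to callers of solve_map).

-- ===== PORT A =====
-- grid[r][c] read (exact when the index is in range; Pre_ keeps every executed read in range)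
def pvCell (g : List (List Char)) (r c : Nat) : Char := (g.getD r []).getD c ' '
-- table[r][c] read with default 0 (tables are rows × cols; every executed read is in range)
def pvGet2 (t : List (List Nat)) (r c : Nat) : Nat := (t.getD r []).getD c 0
-- dp[r][c] = v
def aSet2 (t : List (List Nat)) (r c : Nat) (v : Nat) : List (List Nat) := t.set r ((t.getD r []).set c v)
-- grid[r][c] = v
def aSetCell (g : List (List Char)) (r c : Nat) (v : Char) : List (List Char) := g.set r ((g.getD r []).set c v)

-- body of A's double loop: state (dp, max_size, max_r, max_c)
def aStep (g : List (List Char)) (e : Char) (st : List (List Nat) × Nat × Nat × Nat) (r c : Nat) :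
    List (List Nat) × Nat × Nat × Nat :=
  if pvCell g r c == e then
    let v := if r = 0 ∨ c = 0 then 1
             else min (min (pvGet2 st.1 (r-1) c) (pvGet2 st.1 r (c-1))) (pvGet2 st.1 (r-1) (c-1)) + 1
    let dp' := aSet2 st.1 r c v
    if st.2.1 < pvGet2 dp' r c then (dp', pvGet2 dp' r c, r, c) else (dp', st.2.1, st.2.2.1, st.2.2.2)
  else st

def aLoop (g : List (List Char)) (e : Char) (rows cols : Nat) : List (List Nat) × Nat × Nat × Nat :=
  (List.range rows).foldl (fun st r => (List.range cols).foldl (fun st c => aStep g e st r c) st)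
    (List.replicate rows (List.replicate cols 0), 0, 0, 0)

-- for r in range(max_r-max_size+1, max_r+1): for c in …: grid[r][c] = fill
def aFill (g : List (List Char)) (f : Char) (ms mr mc : Nat) : List (List Char) :=
  (List.range' (mr + 1 - ms) ms).foldl
    (fun g r => (List.range' (mc + 1 - ms) ms).foldl (fun g c => aSetCell g r c f) g) g

def solve_map (map_string : String) : String :=
  let lines := (PySem.Str.split? (PySem.Str.strip map_string) "\n").getD []  -- sep ≠ "" so split? = some
  let header := lines.headD ""                                              -- lines[0]; split is never []
  let hc := header.toList
  let fill := (PySem.List.pyGet? hc (-1)).getD ' '                          -- header[-1]; in range under Pre_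
  let _obs := (PySem.List.pyGet? hc (-2)).getD ' '
  let empty := (PySem.List.pyGet? hc (-3)).getD ' '
  let grid := (PySem.List.slice lines (some 1) none).map String.toList      -- [list(line) for line in lines[1:]]
  let rows := grid.length
  if rows = 0 then map_string
  else
    let cols := (grid.headD []).length
    let res := aLoop grid empty rows cols
    let grid2 := aFill grid fill res.2.1 res.2.2.1 res.2.2.2
    PySem.Str.join "\n" (header :: grid2.map (fun row => String.ofList row)) ++ "\n"

-- ===== PORT B =====
-- one row of run lengths: state (run, row_runs)
def bRunRow (g : List (List Char)) (e : Char) (cols r : Nat) : List Nat :=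
  ((List.range cols).foldl (fun (st : Nat × List Nat) c =>
      let run := if pvCell g r c == e then st.1 + 1 else 0
      (run, st.2 ++ [run])) (0, [])).2

def bRuns (g : List (List Char)) (e : Char) (rows cols : Nat) : List (List Nat) :=
  (List.range rows).foldl (fun acc r => acc ++ [bRunRow g e cols r]) []

-- while i <= r: m = min(m, runs[r-i][c]); if m >= i+1: k, i = i+1, i+1 else: break
def bExpandGo (runs : List (List Nat)) (r c : Nat) (i m k : Nat) : Nat :=
  if h : i ≤ r then
    let m' := min m (pvGet2 runs (r - i) c)
    if i + 1 ≤ m' then bExpandGo runs r c (i+1) m' (i+1) else k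
  else k
termination_by r + 1 - i
decreasing_by omega

def bScan (runs : List (List Nat)) (rows cols : Nat) : Nat × Nat × Nat :=
  (List.range rows).foldl (fun st r => (List.range cols).foldl (fun st c =>
      let k := bExpandGo runs r c 0 (cols + 1) 0
      if st.1 < k then (k, r, c) else st) st) (0, 0, 0)

-- [fill if best_c-best < c <= best_c else ch for c, ch in enumerate(row)]
def bRebuildRow (row : List Char) (f : Char) (b bc : Nat) : List Char :=
  (PySem.List.enumerate row 0).map
    (fun q => if (bc : Int) - (b : Int) < q.1 ∧ q.1 ≤ (bc : Int) then f else q.2)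

def bRebuild (g : List (List Char)) (f : Char) (b br bc : Nat) : List String :=
  (PySem.List.enumerate g 0).foldl (fun acc p =>
    let row := if (br : Int) - (b : Int) < p.1 ∧ p.1 ≤ (br : Int) then bRebuildRow p.2 f b bc else p.2
    acc ++ [String.ofList row]) []

def solve_map_alt (map_string : String) : String :=
  let lines := (PySem.Str.split? (PySem.Str.strip map_string) "\n").getD []
  let header := lines.headD ""
  let hc := header.toList
  let fill := (PySem.List.pyGet? hc (-1)).getD ' '
  let empty := (PySem.List.pyGet? hc (-3)).getD ' '
  let grid := (PySem.List.slice lines (some 1) none).map String.toList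
  let rows := grid.length
  if rows = 0 then map_string
  else
    let cols := (grid.headD []).length
    let runs := bRuns grid empty rows cols
    let res := bScan runs rows cols
    PySem.Str.join "\n" (header :: bRebuild grid fill res.1 res.2.1 res.2.2) ++ "\n"

-- ===== PRECONDITION & SPEC =====
-- Pre_ excludes exactly the inputs where A raises (IndexError): a stripped first line shorter than
-- 3 characters (header[-3]), or a later grid line shorter than the first grid line (grid[r][c]).
def Pre_solve_map (map_string : String) : Prop :=
  let lines := (PySem.Str.split? (PySem.Str.strip map_string) "\n").getD []
  3 ≤ (lines.headD "").toList.length ∧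
    ∀ l ∈ lines.drop 1, (lines.getD 1 "").toList.length ≤ l.toList.length
instance (map_string : String) : Decidable (Pre_solve_map map_string) := by
  unfold Pre_solve_map; infer_instance

def pvWitness_solve_map : String := "2.oF\n.o\n.."

def Spec_solve_map (map_string : String) (out : String) : Prop := out = solve_map_alt map_string
instance (map_string : String) (out : String) : Decidable (Spec_solve_map map_string out) := by
  unfold Spec_solve_map; infer_instance

-- ===== CLAIM (what is proved, stated in full; the proofs are below) =====
def Claim_equal_solve_map : Prop := ∀ (map_string : String), Dom_solve_map map_string →
  Pre_solve_map map_string → Spec_solve_map map_string (solve_map map_string)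

-- ===== LEMMAS AND PROOFS =====

-- cell (r,c) is empty
def pvE (g : List (List Char)) (e : Char) (r c : Nat) : Bool := pvCell g r c == e

-- length of the run of empty cells ending at (r,c) within row r
def pvRun (g : List (List Char)) (e : Char) (r : Nat) : Nat → Nat
  | 0 => if pvE g e r 0 then 1 else 0
  | c+1 => if pvE g e r (c+1) then pvRun g e r c + 1 else 0

-- "a k×k square of empties has bottom-right corner (r,c)", phrased through runs
def pvPb (g : List (List Char)) (e : Char) (r c k : Nat) : Bool :=
  decide (k ≤ r + 1) && decide (∀ i < k, k ≤ pvRun g e (r - i) c)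

def pvP (g : List (List Char)) (e : Char) (r c k : Nat) : Prop := pvPb g e r c k = true

-- side of the largest empty square with bottom-right corner (r,c)
def pvSide (g : List (List Char)) (e : Char) (r c : Nat) : Nat :=
  Nat.findGreatest (fun k => pvPb g e r c k = true) (r + 1)

lemma pvP_iff (g : List (List Char)) (e : Char) (r c k : Nat) :
    pvP g e r c k ↔ (k ≤ r + 1 ∧ ∀ i < k, k ≤ pvRun g e (r - i) c) := by
  simp [pvP, pvPb]

def pvUpd (g : List (List Char)) (e : Char) (st : Nat × Nat × Nat) (r c : Nat) : Nat × Nat × Nat :=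
  if st.1 < pvSide g e r c then (pvSide g e r c, r, c) else st

-- the reference scan both loops compute
def pvScan (g : List (List Char)) (e : Char) (rows cols : Nat) : Nat × Nat × Nat :=
  (List.range rows).foldl (fun st r => (List.range cols).foldl (fun st c => pvUpd g e st r c) st)
    (0, 0, 0)

lemma pvRun_le (g : List (List Char)) (e : Char) (r c : Nat) : pvRun g e r c ≤ c + 1 := by
  induction c with
  | zero => simp only [pvRun]; split <;> omega
  | succ c ih => simp only [pvRun]; split <;> omega

lemma pvRun_pos_iff (g : List (List Char)) (e : Char) (r c : Nat) :
    1 ≤ pvRun g e r c ↔ pvE g e r c = true := by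
  cases c with
  | zero => simp only [pvRun]; split <;> simp_all
  | succ c => simp only [pvRun]; split <;> simp_all

lemma pvRun_succ (g : List (List Char)) (e : Char) (r c : Nat) (hc : 0 < c)
    (hE : pvE g e r c = true) : pvRun g e r c = pvRun g e r (c-1) + 1 := by
  obtain ⟨c', rfl⟩ : ∃ c', c = c' + 1 := ⟨c - 1, by omega⟩
  simp [pvRun, hE]

lemma pvP_mono (g : List (List Char)) (e : Char) (r c : Nat) {j k : Nat} (hjk : j ≤ k)
    (h : pvP g e r c k) : pvP g e r c j := by
  rw [pvP_iff] at h ⊢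
  exact ⟨by omega, fun i hi => le_trans hjk (h.2 i (by omega))⟩

lemma pvP_zero (g : List (List Char)) (e : Char) (r c : Nat) : pvP g e r c 0 := by
  rw [pvP_iff]; exact ⟨by omega, by omega⟩

lemma pvP_pvSide (g : List (List Char)) (e : Char) (r c : Nat) : pvP g e r c (pvSide g e r c) :=
  Nat.findGreatest_spec (m := 0) (by omega) (pvP_zero g e r c)

lemma le_pvSide_iff (g : List (List Char)) (e : Char) (r c k : Nat) :
    k ≤ pvSide g e r c ↔ pvP g e r c k := by
  constructor
  · intro h; exact pvP_mono g e r c h (pvP_pvSide g e r c)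
  · intro h; exact Nat.le_findGreatest ((pvP_iff g e r c k).1 h).1 h

lemma pvSide_le (g : List (List Char)) (e : Char) (r c : Nat) : pvSide g e r c ≤ r + 1 :=
  Nat.findGreatest_le (r + 1)

lemma pvSide_le_col (g : List (List Char)) (e : Char) (r c : Nat) : pvSide g e r c ≤ c + 1 := by
  rcases Nat.eq_zero_or_pos (pvSide g e r c) with h | h
  · omega
  · have hP := (pvP_iff g e r c _).1 (pvP_pvSide g e r c)
    have h2 := hP.2 0 h
    simp only [Nat.sub_zero] at h2
    have := pvRun_le g e r c
    omega

lemma pvSide_eq_zero (g : List (List Char)) (e : Char) (r c : Nat) (h : pvE g e r c = false) :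
    pvSide g e r c = 0 := by
  by_contra hne
  have h1 : 1 ≤ pvSide g e r c := by omega
  have hP := (pvP_iff g e r c 1).1 ((le_pvSide_iff g e r c 1).1 h1)
  have := (pvRun_pos_iff g e r c).1 (by simpa using hP.2 0 (by omega))
  simp [this] at h

lemma pvSide_one_le (g : List (List Char)) (e : Char) (r c : Nat) (h : pvE g e r c = true) :
    1 ≤ pvSide g e r c := by
  rw [le_pvSide_iff, pvP_iff]
  refine ⟨by omega, fun i hi => ?_⟩
  interval_cases i
  simpa using (pvRun_pos_iff g e r c).2 h

lemma pvSide_base (g : List (List Char)) (e : Char) (r c : Nat) (h : pvE g e r c = true)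
    (h0 : r = 0 ∨ c = 0) : pvSide g e r c = 1 := by
  have h1 := pvSide_one_le g e r c h
  have h2 : pvSide g e r c ≤ 1 := by
    by_contra hgt
    have hP := (pvP_iff g e r c _).1 ((le_pvSide_iff g e r c 2).1 (by omega))
    rcases h0 with rfl | rfl
    · omega
    · have := hP.2 0 (by omega)
      have := pvRun_le g e (r - 0) 0
      omega
  omega

lemma pvSide_rec (g : List (List Char)) (e : Char) (r c : Nat) (h : pvE g e r c = true)
    (hr : 0 < r) (hc : 0 < c) :
    pvSide g e r c =
      min (min (pvSide g e (r-1) c) (pvSide g e r (c-1))) (pvSide g e (r-1) (c-1)) + 1 := by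
  set s1 := pvSide g e (r-1) c with hs1
  set s2 := pvSide g e r (c-1) with hs2
  set s3 := pvSide g e (r-1) (c-1) with hs3
  set m := min (min s1 s2) s3 with hm
  have hP1 := (pvP_iff g e (r-1) c _).1 ((le_pvSide_iff g e (r-1) c m).1 (by omega))
  have hP2 := (pvP_iff g e r (c-1) _).1 ((le_pvSide_iff g e r (c-1) m).1 (by omega))
  have hP3 := (pvP_iff g e (r-1) (c-1) _).1 ((le_pvSide_iff g e (r-1) (c-1) m).1 (by omega))
  have hge : m + 1 ≤ pvSide g e r c := by
    rw [le_pvSide_iff, pvP_iff]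
    have hmr : m ≤ r := le_trans (min_le_of_left_le (min_le_left _ _)) (by
      have := pvSide_le g e (r-1) c; omega)
    refine ⟨by omega, fun i hi => ?_⟩
    rcases Nat.eq_zero_or_pos i with rfl | hipos
    · rw [Nat.sub_zero, pvRun_succ g e r c hc h]
      rcases Nat.eq_zero_or_pos m with hm0 | hmpos
      · omega
      · have := hP2.2 0 hmpos
        simpa using by omega
    · -- 1 ≤ i ≤ m, so m ≥ 1
      have hm1 : 1 ≤ m := by omega
      have hup : m ≤ pvRun g e (r - i) c := by
        have := hP1.2 (i - 1) (by omega)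
        have hrw : r - 1 - (i - 1) = r - i := by omega
        rwa [hrw] at this
      have hEri : pvE g e (r - i) c = true :=
        (pvRun_pos_iff g e (r - i) c).1 (by omega)
      have hdiag : m ≤ pvRun g e (r - i) (c - 1) := by
        have := hP3.2 (i - 1) (by omega)
        have hrw : r - 1 - (i - 1) = r - i := by omega
        rwa [hrw] at this
      rw [pvRun_succ g e (r - i) c hc hEri]
      omega
  have hle : pvSide g e r c ≤ m + 1 := by
    set s := pvSide g e r c with hs
    have hs1' : 1 ≤ s := pvSide_one_le g e r c h
    have hPs := (pvP_iff g e r c _).1 (pvP_pvSide g e r c)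
    have hRpos : ∀ i < s, 1 ≤ pvRun g e (r - i) c := fun i hi =>
      le_trans hs1' (hPs.2 i hi)
    have hA : s - 1 ≤ s1 := by
      rw [hs1, le_pvSide_iff, pvP_iff]
      refine ⟨by omega, fun i hi => ?_⟩
      have := hPs.2 (i + 1) (by omega)
      have hrw : r - (i + 1) = r - 1 - i := by omega
      rw [← hrw]; omega
    have hB : s - 1 ≤ s2 := by
      rw [hs2, le_pvSide_iff, pvP_iff]
      refine ⟨by omega, fun i hi => ?_⟩
      have hru : s ≤ pvRun g e (r - i) c := hPs.2 i (by omega)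
      have hE' : pvE g e (r - i) c = true := (pvRun_pos_iff _ _ _ _).1 (by omega)
      have := pvRun_succ g e (r - i) c hc hE'
      omega
    have hC : s - 1 ≤ s3 := by
      rw [hs3, le_pvSide_iff, pvP_iff]
      refine ⟨by omega, fun i hi => ?_⟩
      have hru : s ≤ pvRun g e (r - (i + 1)) c := hPs.2 (i + 1) (by omega)
      have hE' : pvE g e (r - (i + 1)) c = true := (pvRun_pos_iff _ _ _ _).1 (by omega)
      have := pvRun_succ g e (r - (i + 1)) c hc hE'
      have hrw : r - (i + 1) = r - 1 - i := by omega
      rw [← hrw]; omega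
    omega
  omega

-- ---------- A side ----------

def pvDims (t : List (List Nat)) (rows cols : Nat) : Prop :=
  t.length = rows ∧ ∀ row ∈ t, row.length = cols

-- generic "2D set then 2D read" fact, used for the dp table and the char grid
lemma pvSet2Get {α : Type} (t : List (List α)) (r c : Nat) (v : α) (hr : r < t.length)
    (hc : c < (t.getD r []).length) (i j : Nat) (d : α) :
    ((t.set r ((t.getD r []).set c v)).getD i []).getD j d
      = if i = r ∧ j = c then v else (t.getD i []).getD j d := by
  simp only [List.getD_eq_getElem?_getD, List.getElem?_set]
  rw [List.getD_eq_getElem?_getD] at hc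
  by_cases hi : i = r
  · subst hi
    simp only [hr, if_pos, Option.getD_some]
    rcases h : t[i]? with _ | row
    · simp at h; omega
    · simp only [h, Option.getD_some] at hc ⊢
      by_cases hj : j = c
      · subst hj; simp [hc]
      · simp [Ne.symm hj, hj]
  · simp [hi, Ne.symm hi]

lemma pvSet2Dims {α : Type} (t : List (List α)) (r c : Nat) (v : α) (rows cols : Nat)
    (hr : r < t.length) (h1 : t.length = rows) (h2 : ∀ row ∈ t, row.length = cols) :
    (t.set r ((t.getD r []).set c v)).length = rows ∧
      ∀ row ∈ t.set r ((t.getD r []).set c v), row.length = cols := by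
  refine ⟨by simpa using h1, fun row hrow => ?_⟩
  rcases List.mem_or_eq_of_mem_set hrow with h | rfl
  · exact h2 _ h
  · rw [List.length_set]
    exact h2 _ (List.getD_eq_getElem t [] hr ▸ List.getElem_mem hr)

lemma pvGet2_aSet2 (t : List (List Nat)) (rows cols r c i j v : Nat)
    (hd : pvDims t rows cols) (hr : r < rows) (hc : c < cols) :
    pvGet2 (aSet2 t r c v) i j = if i = r ∧ j = c then v else pvGet2 t i j := by
  have hrt : r < t.length := by rw [hd.1]; exact hr
  have hct : c < (t.getD r []).length := by
    rw [hd.2 _ (List.getD_eq_getElem t [] hrt ▸ List.getElem_mem hrt)]; exact hc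
  exact pvSet2Get t r c v hrt hct i j 0

lemma pvDims_aSet2 (t : List (List Nat)) (rows cols r c v : Nat) (hd : pvDims t rows cols)
    (hr : r < rows) : pvDims (aSet2 t r c v) rows cols := by
  unfold pvDims aSet2
  exact pvSet2Dims t r c v rows cols (by rw [hd.1]; exact hr) hd.1 hd.2

def pvInv (g : List (List Char)) (e : Char) (rows cols : Nat) (dp : List (List Nat))
    (r c0 : Nat) : Prop :=
  ∀ i j, i < rows → j < cols →
    pvGet2 dp i j = if i < r ∨ (i = r ∧ j < c0) then pvSide g e i j else 0

lemma aStep_spec (g : List (List Char)) (e : Char) (rows cols r c0 : Nat)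
    (hr : r < rows) (hc0 : c0 < cols) (dp : List (List Nat)) (best : Nat × Nat × Nat)
    (hd : pvDims dp rows cols) (hdp : pvInv g e rows cols dp r c0) :
    ∃ dp1, pvDims dp1 rows cols ∧ pvInv g e rows cols dp1 r (c0 + 1) ∧
      aStep g e (dp, best) r c0 = (dp1, pvUpd g e best r c0) := by
  by_cases hE : pvE g e r c0 = true
  · set v := (if r = 0 ∨ c0 = 0 then 1
        else min (min (pvGet2 dp (r-1) c0) (pvGet2 dp r (c0-1))) (pvGet2 dp (r-1) (c0-1)) + 1)
      with hvdef
    have hv : v = pvSide g e r c0 := by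
      rw [hvdef]
      by_cases h0 : r = 0 ∨ c0 = 0
      · rw [if_pos h0, pvSide_base g e r c0 hE h0]
      · rw [not_or] at h0
        rw [if_neg (by omega)]
        unfold pvInv at hdp
        rw [hdp (r-1) c0 (by omega) hc0, hdp r (c0-1) hr (by omega),
            hdp (r-1) (c0-1) (by omega) (by omega)]
        rw [if_pos (by omega), if_pos (by omega), if_pos (by omega)]
        rw [pvSide_rec g e r c0 hE (by omega) (by omega)]
    refine ⟨aSet2 dp r c0 v, pvDims_aSet2 dp rows cols r c0 v hd hr, ?_, ?_⟩
    · intro i j hi hj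
      rw [pvGet2_aSet2 dp rows cols r c0 i j v hd hr hc0]
      by_cases hij : i = r ∧ j = c0
      · rw [if_pos hij, if_pos (by omega), hij.1, hij.2, hv]
      · rw [if_neg hij, hdp i j hi hj]
        exact if_congr (by omega) rfl rfl
    · have hE2 : (pvCell g r c0 == e) = true := hE
      have hget : pvGet2 (aSet2 dp r c0 v) r c0 = v := by
        rw [pvGet2_aSet2 dp rows cols r c0 r c0 v hd hr hc0]; simp
      simp only [aStep, hE2, if_true, ← hvdef, pvUpd]
      rw [hget, hv]
      split_ifs <;> simp
  · have hE' : pvE g e r c0 = false := by simpa using hE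
    refine ⟨dp, hd, ?_, ?_⟩
    · intro i j hi hj
      rw [hdp i j hi hj]
      by_cases hij : i = r ∧ j = c0
      · rw [if_neg (by omega), if_pos (by omega), hij.1, hij.2,
            pvSide_eq_zero g e r c0 hE']
      · exact if_congr (by omega) rfl rfl
    · have hE2 : (pvCell g r c0 == e) = false := hE'
      simp [aStep, hE2, pvUpd, pvSide_eq_zero g e r c0 hE']

lemma aInner (g : List (List Char)) (e : Char) (rows cols r : Nat) (hr : r < rows) :
    ∀ (n c0 : Nat), c0 + n = cols →
    ∀ (dp : List (List Nat)) (best : Nat × Nat × Nat),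
      pvDims dp rows cols → pvInv g e rows cols dp r c0 →
      ∃ dp', pvDims dp' rows cols ∧ pvInv g e rows cols dp' r (c0 + n) ∧
        (List.range' c0 n).foldl (fun st c => aStep g e st r c) (dp, best) =
          (dp', (List.range' c0 n).foldl (fun st c => pvUpd g e st r c) best) := by
  intro n
  induction n with
  | zero => intro c0 h dp best hd hdp; exact ⟨dp, hd, hdp, rfl⟩
  | succ n ih =>
    intro c0 h dp best hd hdp
    obtain ⟨dp1, hd1, hdp1, hstep⟩ :=
      aStep_spec g e rows cols r c0 hr (by omega) dp best hd hdp
    obtain ⟨dp', hd', hdp', hfold⟩ := ih (c0 + 1) (by omega) dp1 (pvUpd g e best r c0) hd1 hdp1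
    refine ⟨dp', hd', by simpa [Nat.add_assoc, Nat.add_comm 1 n] using hdp', ?_⟩
    rw [List.range'_succ, List.foldl_cons, List.foldl_cons, hstep, hfold]

lemma aOuter (g : List (List Char)) (e : Char) (rows cols : Nat) :
    ∀ (n r0 : Nat), r0 + n = rows →
    ∀ (dp : List (List Nat)) (best : Nat × Nat × Nat),
      pvDims dp rows cols → pvInv g e rows cols dp r0 0 →
      ∃ dp',
        (List.range' r0 n).foldl
            (fun st r => (List.range cols).foldl (fun st c => aStep g e st r c) st) (dp, best) =
          (dp', (List.range' r0 n).foldl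
            (fun st r => (List.range cols).foldl (fun st c => pvUpd g e st r c) st) best) := by
  intro n
  induction n with
  | zero => intro r0 h dp best hd hdp; exact ⟨dp, rfl⟩
  | succ n ih =>
    intro r0 h dp best hd hdp
    obtain ⟨dp1, hd1, hdp1, hrow⟩ :=
      aInner g e rows cols r0 (by omega) cols 0 (by omega) dp best hd hdp
    have hdp1' : pvInv g e rows cols dp1 (r0 + 1) 0 := by
      intro i j hi hj
      rw [hdp1 i j hi hj]
      exact if_congr (by omega) rfl rfl
    obtain ⟨dp', hfold⟩ := ih (r0 + 1) (by omega) dp1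
      ((List.range cols).foldl (fun st c => pvUpd g e st r0 c) best) hd1 hdp1'
    refine ⟨dp', ?_⟩
    rw [List.range'_succ, List.foldl_cons, List.foldl_cons, List.range_eq_range', hrow,
        ← List.range_eq_range', hfold]

lemma aLoop_eq_pvScan (g : List (List Char)) (e : Char) (rows cols : Nat) :
    (aLoop g e rows cols).2 = pvScan g e rows cols := by
  unfold aLoop pvScan
  have hd : pvDims (List.replicate rows (List.replicate cols 0)) rows cols := by
    constructor
    · simp
    · intro row hrow
      rw [List.eq_of_mem_replicate hrow]; simp
  have hdp : pvInv g e rows cols (List.replicate rows (List.replicate cols 0)) 0 0 := by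
    intro i j hi hj
    rw [if_neg (by omega)]
    unfold pvGet2
    have h1 : (List.replicate rows (List.replicate cols (0:Nat))).getD i [] = List.replicate cols 0 := by
      rw [List.getD_eq_getElem _ _ (by simpa using hi), List.getElem_replicate]
    rw [h1, List.getD_eq_getElem _ _ (by simpa using hj), List.getElem_replicate]
  obtain ⟨dp', hfold⟩ := aOuter g e rows cols rows 0 (by omega)
    (List.replicate rows (List.replicate cols 0)) (0, 0, 0) hd hdp
  rw [List.range_eq_range' (n := rows), hfold, ← List.range_eq_range']

-- ---------- B side ----------

lemma bRunRowAux (g : List (List Char)) (e : Char) (r : Nat) :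
    ∀ (n c0 : Nat) (st : Nat × List Nat),
      st.1 = (if c0 = 0 then 0 else pvRun g e r (c0 - 1)) →
      (List.range' c0 n).foldl (fun (st : Nat × List Nat) c =>
          let run := if pvCell g r c == e then st.1 + 1 else 0
          (run, st.2 ++ [run])) st
        = ((if c0 + n = 0 then 0 else pvRun g e r (c0 + n - 1)),
            st.2 ++ (List.range' c0 n).map (pvRun g e r)) := by
  intro n
  induction n with
  | zero =>
    intro c0 st h1
    simp only [List.range'_zero, List.foldl_nil, List.map_nil, List.append_nil, Nat.add_zero]
    rw [← h1]
  | succ n ih =>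
    intro c0 st h1
    rw [List.range'_succ, List.foldl_cons]
    have hrun : (if pvCell g r c0 == e then st.1 + 1 else 0) = pvRun g e r c0 := by
      rcases Nat.eq_zero_or_pos c0 with rfl | hpos
      · rw [if_pos rfl] at h1
        simp [pvRun, pvE, h1]
      · obtain ⟨c', rfl⟩ : ∃ c', c0 = c' + 1 := ⟨c0 - 1, by omega⟩
        rw [if_neg (show ¬(c' + 1 = 0) by omega), Nat.add_sub_cancel] at h1
        simp [pvRun, pvE, h1]
    have := ih (c0 + 1) ((if pvCell g r c0 == e then st.1 + 1 else 0),
        st.2 ++ [if pvCell g r c0 == e then st.1 + 1 else 0])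
      (by show (if pvCell g r c0 == e then st.1 + 1 else 0) = _
          rw [hrun, if_neg (Nat.succ_ne_zero c0)]; simp)
    simp only at this ⊢
    have e1 : c0 + 1 + n = c0 + (n + 1) := by omega
    rw [this, hrun, e1]
    simp [List.append_assoc]

lemma bRunRow_spec (g : List (List Char)) (e : Char) (cols r : Nat) :
    (bRunRow g e cols r).length = cols ∧
      ∀ j < cols, (bRunRow g e cols r).getD j 0 = pvRun g e r j := by
  have h := bRunRowAux g e r cols 0 (0, []) (by simp)
  unfold bRunRow
  rw [← List.range_eq_range'] at h
  rw [h]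
  simp only [List.nil_append]
  constructor
  · simp
  · intro j hj
    rw [List.getD_eq_getElem _ _ (by simpa using hj)]
    simp

lemma bRuns_eq_map (g : List (List Char)) (e : Char) (rows cols : Nat) :
    bRuns g e rows cols = (List.range rows).map (bRunRow g e cols) := by
  unfold bRuns
  rw [PySem.List.foldl_append_singleton_eq_map]
  simp

lemma bRuns_get2 (g : List (List Char)) (e : Char) (rows cols : Nat) (i j : Nat)
    (hi : i < rows) (hj : j < cols) : pvGet2 (bRuns g e rows cols) i j = pvRun g e i j := by
  unfold pvGet2
  rw [bRuns_eq_map]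
  have h1 : ((List.range rows).map (bRunRow g e cols)).getD i [] = bRunRow g e cols i := by
    rw [List.getD_eq_getElem _ _ (by simpa using hi)]
    simp
  rw [h1]
  exact (bRunRow_spec g e cols i).2 j hj

lemma bExpandGoAux (g : List (List Char)) (e : Char) (rows cols r c : Nat)
    (hr : r < rows) (hc : c < cols) :
    ∀ (d i m : Nat), r + 1 - i = d → i ≤ r + 1 → i ≤ pvSide g e r c →
      (∀ j : Nat, j ≤ m ↔ (j ≤ cols + 1 ∧ ∀ i' < i, j ≤ pvRun g e (r - i') c)) →
      bExpandGo (bRuns g e rows cols) r c i m i = pvSide g e r c := by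
  intro d
  induction d with
  | zero =>
    intro i m hd hi1 hi2 hm
    rw [bExpandGo, dif_neg (by omega)]
    have := pvSide_le g e r c
    omega
  | succ d ihd =>
    intro i m hd hi1 hi2 hm
    rw [bExpandGo, dif_pos (by omega : i ≤ r)]
    have hget : pvGet2 (bRuns g e rows cols) (r - i) c = pvRun g e (r - i) c :=
      bRuns_get2 g e rows cols (r - i) c (by omega) hc
    simp only [hget]
    have hiff : i + 1 ≤ min m (pvRun g e (r - i) c) ↔ i + 1 ≤ pvSide g e r c := by
      constructor
      · intro h
        rw [le_pvSide_iff, pvP_iff]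
        refine ⟨by omega, fun i' hi' => ?_⟩
        rcases Nat.lt_or_ge i' i with h' | h'
        · exact ((hm (i + 1)).1 (by omega)).2 i' h'
        · have : i' = i := by omega
          subst this
          omega
      · intro h
        have hP := (pvP_iff g e r c _).1 ((le_pvSide_iff g e r c (i+1)).1 h)
        have hcol : i + 1 ≤ cols + 1 := by
          have := pvSide_le_col g e r c
          omega
        have h1 : i + 1 ≤ m := (hm (i + 1)).2 ⟨hcol, fun i' hi' => hP.2 i' (by omega)⟩
        have h2 : i + 1 ≤ pvRun g e (r - i) c := hP.2 i (by omega)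
        omega
    by_cases hcond : i + 1 ≤ min m (pvRun g e (r - i) c)
    · rw [if_pos hcond]
      refine ihd (i + 1) _ (by omega) (by omega) (hiff.1 hcond) ?_
      intro j
      constructor
      · intro hj
        have hj1 : j ≤ m := by omega
        have := (hm j).1 hj1
        refine ⟨this.1, fun i' hi' => ?_⟩
        rcases Nat.lt_or_ge i' i with h' | h'
        · exact this.2 i' h'
        · have : i' = i := by omega
          subst this
          omega
      · intro ⟨hj1, hj2⟩
        have := (hm j).2 ⟨hj1, fun i' hi' => hj2 i' (by omega)⟩
        have := hj2 i (by omega)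
        omega
    · rw [if_neg hcond]
      have : ¬ (i + 1 ≤ pvSide g e r c) := fun h => hcond (hiff.2 h)
      omega

lemma bExpandGo_eq_pvSide (g : List (List Char)) (e : Char) (rows cols : Nat)
    (r c : Nat) (hr : r < rows) (hc : c < cols) :
    bExpandGo (bRuns g e rows cols) r c 0 (cols + 1) 0 = pvSide g e r c := by
  refine bExpandGoAux g e rows cols r c hr hc (r + 1) 0 (cols + 1) (by omega) (by omega)
    (by omega) ?_
  intro j
  constructor
  · intro hj; exact ⟨hj, by omega⟩
  · intro h; exact h.1

lemma bScan_eq_pvScan (g : List (List Char)) (e : Char) (rows cols : Nat) :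
    bScan (bRuns g e rows cols) rows cols = pvScan g e rows cols := by
  unfold bScan pvScan
  apply PySem.List.foldl_congr_mem
  intro acc r hrmem
  apply PySem.List.foldl_congr_mem
  intro acc' c hcmem
  rw [bExpandGo_eq_pvSide g e rows cols r c (List.mem_range.1 hrmem) (List.mem_range.1 hcmem)]
  rfl

-- ---------- scan facts ----------

lemma pvScan_bounds (g : List (List Char)) (e : Char) (rows cols : Nat) :
    (pvScan g e rows cols = (0, 0, 0)) ∨
      (0 < (pvScan g e rows cols).1 ∧ (pvScan g e rows cols).2.1 < rows ∧
        (pvScan g e rows cols).2.2 < cols ∧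
        (pvScan g e rows cols).1 = pvSide g e (pvScan g e rows cols).2.1 (pvScan g e rows cols).2.2) := by
  unfold pvScan
  refine List.foldlRecOn (motive := fun st => st = (0, 0, 0) ∨
      (0 < st.1 ∧ st.2.1 < rows ∧ st.2.2 < cols ∧ st.1 = pvSide g e st.2.1 st.2.2))
    (List.range rows) _ (Or.inl rfl) ?_
  · intro st hst r hrmem
    refine List.foldlRecOn (motive := fun st => st = (0, 0, 0) ∨
        (0 < st.1 ∧ st.2.1 < rows ∧ st.2.2 < cols ∧ st.1 = pvSide g e st.2.1 st.2.2))
      (List.range cols) _ hst ?_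
    · intro st' hst' c hcmem
      unfold pvUpd
      split
      · right
        refine ⟨by omega, List.mem_range.1 hrmem, List.mem_range.1 hcmem, rfl⟩
      · exact hst'


-- ---------- fill equality ----------

lemma pvGetD_set {α : Type} (row : List α) (c j : Nat) (f d : α) :
    (row.set c f).getD j d = if j = c ∧ c < row.length then f else row.getD j d := by
  simp only [List.getD_eq_getElem?_getD, List.getElem?_set]
  by_cases hj : j = c
  · subst hj
    by_cases hc : j < row.length
    · rw [if_pos rfl, if_pos hc, if_pos ⟨rfl, hc⟩]; rfl
    · rw [if_pos rfl, if_neg hc, if_neg (fun hh => hc hh.2),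
          List.getElem?_eq_none_iff.2 (by omega)]
  · rw [if_neg (fun hh => hj hh.symm), if_neg (fun hh => hj hh.1)]

lemma pvSetFold_len {α : Type} (f : α) (l : List Nat) (row : List α) :
    (l.foldl (fun row c => row.set c f) row).length = row.length := by
  refine List.foldlRecOn (motive := fun (t : List α) => t.length = row.length) l _ rfl ?_
  intro t ht c _
  rw [List.length_set, ht]

lemma pvColFillGetD {α : Type} (f d : α) :
    ∀ (n c0 : Nat) (row : List α) (j : Nat),
      ((List.range' c0 n).foldl (fun row c => row.set c f) row).getD j d
        = if c0 ≤ j ∧ j < c0 + n ∧ j < row.length then f else row.getD j d := by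
  intro n
  induction n with
  | zero => intro c0 row j; rw [if_neg (by omega)]; rfl
  | succ n ih =>
    intro c0 row j
    rw [List.range'_succ, List.foldl_cons, ih (c0 + 1) (row.set c0 f) j, List.length_set,
        pvGetD_set row c0 j f d]
    by_cases h1 : c0 + 1 ≤ j ∧ j < c0 + 1 + n ∧ j < row.length
    · rw [if_pos h1, if_pos (by omega)]
    · rw [if_neg h1]
      by_cases h2 : j = c0 ∧ c0 < row.length
      · rw [if_pos h2, if_pos (by omega)]
      · rw [if_neg h2, if_neg (by omega)]

lemma pvSet_getD_self {α : Type} (g : List (List α)) (r : Nat) (x : List α) :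
    (g.set r x).getD r [] = if r < g.length then x else [] := by
  simp only [List.getD_eq_getElem?_getD, List.getElem?_set]
  rw [if_pos trivial]
  by_cases hr : r < g.length
  · rw [if_pos hr, if_pos hr]; rfl
  · rw [if_neg hr, if_neg hr]; rfl

lemma pvSet_self_getD (g : List (List Char)) (r : Nat) : g.set r (g.getD r []) = g := by
  by_cases hr : r < g.length
  · rw [List.getD_eq_getElem _ _ hr]
    exact List.set_getElem_self hr
  · exact List.set_eq_of_length_le (by omega)

lemma pvInnerFill (f : Char) : ∀ (n c0 r : Nat) (g : List (List Char)),
    (List.range' c0 n).foldl (fun g c => aSetCell g r c f) g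
      = g.set r ((List.range' c0 n).foldl (fun row c => row.set c f) (g.getD r [])) := by
  intro n
  induction n with
  | zero => intro c0 r g; exact (pvSet_self_getD g r).symm
  | succ n ih =>
    intro c0 r g
    rw [List.range'_succ, List.foldl_cons, List.foldl_cons]
    show (List.range' (c0+1) n).foldl (fun g c => aSetCell g r c f) (aSetCell g r c0 f) = _
    rw [ih (c0 + 1) r (aSetCell g r c0 f)]
    unfold aSetCell
    rw [List.set_set]
    congr 2
    rw [pvSet_getD_self]
    by_cases hr : r < g.length
    · rw [if_pos hr]
    · rw [if_neg hr, List.getD_eq_default _ _ (by omega)]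
      rfl

lemma pvOuterFill_getD (f : Char) (b bc : Nat) :
    ∀ (n r0 : Nat) (g : List (List Char)) (i : Nat),
      ((List.range' r0 n).foldl
          (fun g r => g.set r ((List.range' (bc + 1 - b) b).foldl (fun row c => row.set c f) (g.getD r []))) g).getD i []
        = if r0 ≤ i ∧ i < r0 + n ∧ i < g.length then
            (List.range' (bc + 1 - b) b).foldl (fun row c => row.set c f) (g.getD i [])
          else g.getD i [] := by
  intro n
  induction n with
  | zero => intro r0 g i; rw [if_neg (by omega)]; rfl
  | succ n ih =>
    intro r0 g i
    set g1 := g.set r0 ((List.range' (bc + 1 - b) b).foldl (fun row c => row.set c f) (g.getD r0 []))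
      with hg1
    rw [List.range'_succ, List.foldl_cons, ih (r0 + 1) g1 i]
    have hlen1 : g1.length = g.length := by rw [hg1, List.length_set]
    by_cases h1 : r0 + 1 ≤ i ∧ i < r0 + 1 + n ∧ i < g1.length
    · rw [if_pos h1, if_pos (by omega)]
      congr 1
      rw [hg1]
      simp only [List.getD_eq_getElem?_getD, List.getElem?_set]
      rw [if_neg (by omega)]
    · rw [if_neg h1]
      by_cases h2 : i = r0 ∧ r0 < g.length
      · rw [if_pos (by omega)]
        rw [hg1, h2.1, pvSet_getD_self, if_pos h2.2]
      · rw [if_neg (by omega)]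
        rw [hg1]
        simp only [List.getD_eq_getElem?_getD, List.getElem?_set]
        by_cases h3 : r0 = i
        · have hrl : ¬ r0 < g.length := fun hh => h2 ⟨h3.symm, hh⟩
          have hnone : g[i]? = none := List.getElem?_eq_none_iff.2 (by omega)
          rw [if_pos h3, if_neg hrl, hnone]
        · rw [if_neg h3]

lemma pvAFill_eq (g : List (List Char)) (f : Char) (b br bc : Nat) :
    aFill g f b br bc
      = (List.range' (br + 1 - b) b).foldl
          (fun g r => g.set r ((List.range' (bc + 1 - b) b).foldl (fun row c => row.set c f) (g.getD r []))) g := by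
  unfold aFill
  apply PySem.List.foldl_congr_mem
  intro acc r _
  exact pvInnerFill f b (bc + 1 - b) r acc

lemma pvAFill_len (g : List (List Char)) (f : Char) (b br bc : Nat) :
    (aFill g f b br bc).length = g.length := by
  rw [pvAFill_eq]
  refine List.foldlRecOn (motive := fun (t : List (List Char)) => t.length = g.length) _ _ rfl ?_
  intro t ht r _
  rw [List.length_set, ht]

lemma pvEnumMap_getD {α β : Type} (F : Int × α → β) (d : β) :
    ∀ (xs : List α) (s : Int) (j : Nat), (hj : j < xs.length) →
      ((PySem.List.enumerate xs s).map F).getD j d = F (s + (j : Int), xs[j]) := by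
  intro xs
  induction xs with
  | nil => intro s j hj; simp at hj
  | cons x xs ih =>
    intro s j hj
    rw [PySem.List.enumerate_cons, List.map_cons]
    cases j with
    | zero => simp
    | succ j =>
      have := ih (s + 1) j (by simpa using hj)
      simp only [List.getD_cons_succ, this]
      congr 2
      push_cast
      ring

lemma pvBRebuild_eq (g : List (List Char)) (f : Char) (b br bc : Nat) :
    bRebuild g f b br bc
      = (PySem.List.enumerate g 0).map (fun p =>
          String.ofList (if (br : Int) - (b : Int) < p.1 ∧ p.1 ≤ (br : Int)
            then bRebuildRow p.2 f b bc else p.2)) := by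
  unfold bRebuild
  exact (PySem.List.foldl_append_singleton_eq_map _ _ []).trans (by simp)

lemma pvBRebuildRow_len (row : List Char) (f : Char) (b bc : Nat) :
    (bRebuildRow row f b bc).length = row.length := by
  unfold bRebuildRow
  rw [List.length_map, PySem.List.length_enumerate]

lemma pvBRebuildRow_getD (row : List Char) (f : Char) (b bc : Nat) (j : Nat) (hj : j < row.length) :
    (bRebuildRow row f b bc).getD j ' '
      = if (bc : Int) - (b : Int) < (j : Int) ∧ (j : Int) ≤ (bc : Int) then f else row[j] := by
  unfold bRebuildRow
  rw [pvEnumMap_getD _ ' ' row 0 j hj]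
  simp

lemma fill_eq (g : List (List Char)) (f : Char) (rows cols b br bc : Nat)
    (_hrows : rows = g.length) (_hlen : ∀ row ∈ g, cols ≤ row.length)
    (hb : (b = 0 ∧ br = 0 ∧ bc = 0) ∨ (0 < b ∧ br < rows ∧ bc < cols ∧ b ≤ br + 1 ∧ b ≤ bc + 1)) :
    (aFill g f b br bc).map (fun row => String.ofList row) = bRebuild g f b br bc := by
  rw [pvBRebuild_eq]
  apply List.ext_getElem
  · rw [List.length_map, pvAFill_len, List.length_map, PySem.List.length_enumerate]
  · intro i hi1 hi2
    rw [List.length_map, pvAFill_len] at hi1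
    have hAi : i < (aFill g f b br bc).length := by rw [pvAFill_len]; omega
    rw [List.getElem_map, ← List.getD_eq_getElem _ [] hAi]
    have hB : ((PySem.List.enumerate g 0).map (fun p =>
        String.ofList (if (br : Int) - (b : Int) < p.1 ∧ p.1 ≤ (br : Int)
          then bRebuildRow p.2 f b bc else p.2)))[i]
        = String.ofList (if (br : Int) - (b : Int) < (i : Int) ∧ (i : Int) ≤ (br : Int)
          then bRebuildRow g[i] f b bc else g[i]) := by
      rw [← List.getD_eq_getElem _ "" hi2, pvEnumMap_getD _ "" g 0 i hi1]
      norm_num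
    rw [hB, pvAFill_eq, pvOuterFill_getD f b bc b (br + 1 - b) g i]
    by_cases hcond : br + 1 - b ≤ i ∧ i < br + 1 - b + b ∧ i < g.length
    · rw [if_pos hcond]
      have hcondB : (br : Int) - (b : Int) < (i : Int) ∧ (i : Int) ≤ (br : Int) := by
        rcases hb with ⟨rfl, rfl, rfl⟩ | ⟨h1, h2, h3, h4, h5⟩
        · omega
        · constructor <;> [push_cast; push_cast] <;> omega
      rw [if_pos hcondB]
      -- rows inside the square: char-by-char
      congr 1
      apply List.ext_getElem
      · rw [pvSetFold_len, pvBRebuildRow_len, List.getD_eq_getElem _ [] hi1]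
      · intro j hj1 hj2
        rw [pvSetFold_len] at hj1
        have hj : j < g[i].length := by
          rw [List.getD_eq_getElem _ [] hi1] at hj1; exact hj1
        rw [← List.getD_eq_getElem _ ' ' hj2, ← List.getD_eq_getElem _ ' '
            (by rw [pvSetFold_len]; exact hj1),
            pvColFillGetD f ' ' b (bc + 1 - b) (g.getD i []) j,
            pvBRebuildRow_getD g[i] f b bc j hj]
        rcases hb with ⟨rfl, rfl, rfl⟩ | ⟨h1, h2, h3, h4, h5⟩
        · omega
        · by_cases hc2 : bc + 1 - b ≤ j ∧ j < bc + 1 - b + b ∧ j < (g.getD i []).length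
          · rw [if_pos hc2, if_pos (by constructor <;> [push_cast; push_cast] <;> omega)]
          · rw [List.getD_eq_getElem _ [] hi1] at hc2
            rw [if_neg (by rw [List.getD_eq_getElem _ [] hi1]; exact hc2),
                if_neg (by intro h; exact hc2 ⟨by omega, by omega, hj⟩),
                List.getD_eq_getElem _ [] hi1, List.getD_eq_getElem _ ' ' hj]
    · rw [if_neg hcond]
      have hcondB : ¬ ((br : Int) - (b : Int) < (i : Int) ∧ (i : Int) ≤ (br : Int)) := by
        rcases hb with ⟨rfl, rfl, rfl⟩ | ⟨h1, h2, h3, h4, h5⟩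
        · omega
        · intro ⟨x1, x2⟩
          apply hcond
          refine ⟨by omega, by omega, by omega⟩
      rw [if_neg hcondB, List.getD_eq_getElem _ [] hi1]

lemma main_branch (g : List (List Char)) (e f : Char)
    (hlen : ∀ row ∈ g, (g.headD []).length ≤ row.length) :
    (aFill g f (aLoop g e g.length (g.headD []).length).2.1
        (aLoop g e g.length (g.headD []).length).2.2.1
        (aLoop g e g.length (g.headD []).length).2.2.2).map (fun row => String.ofList row)
      = bRebuild g f
          (bScan (bRuns g e g.length (g.headD []).length) g.length (g.headD []).length).1
          (bScan (bRuns g e g.length (g.headD []).length) g.length (g.headD []).length).2.1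
          (bScan (bRuns g e g.length (g.headD []).length) g.length (g.headD []).length).2.2 := by
  rw [aLoop_eq_pvScan, bScan_eq_pvScan]
  refine fill_eq g f g.length (g.headD []).length _ _ _ rfl hlen ?_
  rcases pvScan_bounds g e g.length (g.headD []).length with h | ⟨h1, h2, h3, h4⟩
  · left
    rw [h]
    exact ⟨rfl, rfl, rfl⟩
  · right
    refine ⟨h1, h2, h3, ?_, ?_⟩
    · rw [h4]; exact pvSide_le g e _ _
    · rw [h4]; exact pvSide_le_col g e _ _

-- ===== VERDICT (by name: the statement is the Claim_ definition above) =====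
theorem solve_map_spec : Claim_equal_solve_map := by
  intro s hdom hpre
  simp only [Spec_solve_map, solve_map, solve_map_alt]
  simp only [Pre_solve_map] at hpre
  set lines := (PySem.Str.split? (PySem.Str.strip s) "\n").getD [] with hlines
  set header := lines.headD "" with hheader
  set grid := (PySem.List.slice lines (some 1) none).map String.toList with hgrid
  by_cases h0 : grid.length = 0
  · rw [if_pos h0, if_pos h0]
  · rw [if_neg h0, if_neg h0]
    have hlen : ∀ row ∈ grid, (grid.headD []).length ≤ row.length := by
      intro row hrow
      rw [hgrid, PySem.List.slice_from_one] at hrow ⊢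
      obtain ⟨l, hl, rfl⟩ := List.mem_map.1 hrow
      have hcols : ((lines.tail.map String.toList).headD []).length
          = (lines.getD 1 "").toList.length := by
        match h : lines with
        | [] => exfalso; apply h0; rw [hgrid, PySem.List.slice_from_one]; rfl
        | [a] => exfalso; apply h0; rw [hgrid, PySem.List.slice_from_one]; rfl
        | a :: b :: t => rfl
      rw [hcols]
      refine hpre.2 l ?_
      simpa using hl
    exact congrArg (fun x => PySem.Str.join "\n" (header :: x) ++ "\n")
      (main_branch grid _ _ hlen)
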